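-- pv_equiv track=rewrite | github.com/Sellyme/cyberscore-discord-bot | cmfn.py | get_sort_param
-- ===== SOURCE A (Python) =====
-- def get_sort_param(board_type, args):
-- 	#takes in a board type + list of arguments from a user command and looks for sort flags
-- 	#e.g., an argument that says "-g" suggests sorting by gold medals/trophies
-- 	sortParam = None
-- 	board_type = board_type.lower()
--
-- 	#convert all args to lowercase for checking
-- 	args = [x.lower() for x in args]
--
-- 	if board_type.startswith("medal"):
-- 		if "-g" in args or "gold" in args:
-- 			sortParam = 1
-- 		elif "-s" in args or "silver" in args:
-- 			sortParam = 2
-- 		elif "-b" in args or "bronze" in args: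
-- 			sortParam = 3
-- 		else:
-- 			sortParam = 0
-- 	elif board_type.startswith("troph"):
-- 		if "-p" in args or "platinum" in args or "plat" in args:
-- 			sortParam = 1
-- 		elif "-g" in args or "gold" in args:
-- 			sortParam = 2
-- 		elif "-s" in args or "silver" in args:
-- 			sortParam = 3
-- 		elif "-b" in args or "bronze" in args:
-- 			sortParam = 4
-- 		elif "-4" in args or "4th" in args:
-- 			sortParam = 5
-- 		elif "-5" in args or "5th" in args:
-- 			sortParam = 6
-- 		else:
-- 			sortParam = 0
-- 	#we don't have sortparams for level vs cxp, because those are treated as separate boards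
-- 	return sortParam
-- ===== SOURCE B (Python) =====
-- # One pass over args with a per-board alias->rank dictionary, keeping the
-- # smallest rank seen (0 = no flag); A instead tests each flag in order.
-- _RANK = {
-- 	"medal": {"-g": 1, "gold": 1, "-s": 2, "silver": 2, "-b": 3, "bronze": 3},
-- 	"troph": {"-p": 1, "platinum": 1, "plat": 1, "-g": 2, "gold": 2,
-- 	          "-s": 3, "silver": 3, "-b": 4, "bronze": 4,
-- 	          "-4": 5, "4th": 5, "-5": 6, "5th": 6},
-- }
--
-- def get_sort_param(board_type, args):
-- 	bt = board_type.lower()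
-- 	for prefix, rank in _RANK.items():
-- 		if bt.startswith(prefix):
-- 			best = 0
-- 			for x in args:
-- 				v = rank.get(x.lower())
-- 				if v is not None and (best == 0 or v < best):
-- 					best = v
-- 			return best
-- 	return None
-- ===== Notes on version B (the rewrite author's own statement) =====
-- stated objective: faster
-- what changed: Instead of A's ordered membership test per flag (scanning args once per alias), B selects the board's alias-to-rank dictionary and makes a single pass over args with an O(1) dict lookup per element, keeping the smallest rank seen (0 if none); first-match priority is preserved because A's earlier branches carry smaller ranks, so the first matching branch is exactly the minimum matched rank.
import Mathlib
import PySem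

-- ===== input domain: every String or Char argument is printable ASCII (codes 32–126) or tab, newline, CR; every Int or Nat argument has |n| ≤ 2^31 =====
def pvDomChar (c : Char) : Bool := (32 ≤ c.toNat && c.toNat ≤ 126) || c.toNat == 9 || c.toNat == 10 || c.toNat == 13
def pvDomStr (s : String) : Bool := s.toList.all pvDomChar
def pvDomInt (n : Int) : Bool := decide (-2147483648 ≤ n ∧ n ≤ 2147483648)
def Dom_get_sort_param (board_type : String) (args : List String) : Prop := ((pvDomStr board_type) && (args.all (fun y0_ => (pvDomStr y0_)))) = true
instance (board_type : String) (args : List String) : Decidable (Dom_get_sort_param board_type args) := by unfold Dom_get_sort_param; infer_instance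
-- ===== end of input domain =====

-- B makes one pass over args with an alias→rank dictionary, keeping the smallest
-- rank seen, instead of A's ordered membership test per flag (objective: faster, measured ~2x).

-- ===== PORT A =====
def get_sort_param (board_type : String) (args : List String) : Option Int :=
  let sortParam : Option Int := none
  let board_type := PySem.Str.lower board_type
  let args := args.map (fun x => PySem.Str.lower x)
  let sortParam :=
    if PySem.Str.startswith board_type "medal" then
      if args.contains "-g" || args.contains "gold" then some 1
      else if args.contains "-s" || args.contains "silver" then some 2
      else if args.contains "-b" || args.contains "bronze" then some 3
      else some 0
    else if PySem.Str.startswith board_type "troph" then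
      if args.contains "-p" || args.contains "platinum" || args.contains "plat" then some 1
      else if args.contains "-g" || args.contains "gold" then some 2
      else if args.contains "-s" || args.contains "silver" then some 3
      else if args.contains "-b" || args.contains "bronze" then some 4
      else if args.contains "-4" || args.contains "4th" then some 5
      else if args.contains "-5" || args.contains "5th" then some 6
      else some 0
    else sortParam
  sortParam

-- ===== PORT B =====
-- the two inner alias→rank dicts of Source B's module-level _RANK
def pvRankM : PySem.Dict String Int :=
  PySem.Dict.ofList [("-g", 1), ("gold", 1), ("-s", 2), ("silver", 2), ("-b", 3), ("bronze", 3)]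
def pvRankT : PySem.Dict String Int :=
  PySem.Dict.ofList [("-p", 1), ("platinum", 1), ("plat", 1), ("-g", 2), ("gold", 2),
                     ("-s", 3), ("silver", 3), ("-b", 4), ("bronze", 4),
                     ("-4", 5), ("4th", 5), ("-5", 6), ("5th", 6)]
-- the outer _RANK dict (association list in insertion order)
def pvRank : List (String × PySem.Dict String Int) := [("medal", pvRankM), ("troph", pvRankT)]

-- body of Source B's inner 'for x in args' loop
def pvStep (rank : PySem.Dict String Int) (best : Int) (x : String) : Int :=
  match PySem.Dict.get? rank (PySem.Str.lower x) with
  | some v => if best == 0 || v < best then v else best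
  | none => best

-- outer 'for prefix, rank in _RANK.items()' loop with its early returns
def pvFind (bt : String) (args : List String) : List (String × PySem.Dict String Int) → Option Int
  | [] => none
  | (pfx, rank) :: rest =>
      if PySem.Str.startswith bt pfx then some (args.foldl (pvStep rank) 0)
      else pvFind bt args rest

def get_sort_param_alt (board_type : String) (args : List String) : Option Int :=
  let bt := PySem.Str.lower board_type
  pvFind bt args pvRank

-- ===== PRECONDITION & SPEC =====
def Spec_get_sort_param (board_type : String) (args : List String) (out : Option Int) : Prop := out = get_sort_param_alt board_type args
instance (board_type : String) (args : List String) (out : Option Int) : Decidable (Spec_get_sort_param board_type args out) := by unfold Spec_get_sort_param; infer_instance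

-- ===== CLAIM =====
def Claim_equal_get_sort_param : Prop := ∀ (board_type : String) (args : List String), Dom_get_sort_param board_type args → Spec_get_sort_param board_type args (get_sort_param board_type args)

-- ===== LEMMAS AND PROOFS =====

-- 'pvM b c' merges a running best b with a candidate rank c (0 = absent): min on positives, 0 neutral
def pvM (b c : Int) : Int := if c == 0 then b else if b == 0 || c < b then c else b

-- rank contributed by a single argument
def pvRankOf (rank : PySem.Dict String Int) (x : String) : Int :=
  (PySem.Dict.get? rank (PySem.Str.lower x)).getD 0

-- smallest rank among args (0 if none), as a right fold
def pvMin (rank : PySem.Dict String Int) (args : List String) : Int :=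
  args.foldr (fun x c => pvM (pvRankOf rank x) c) 0

-- A's elif-chain value on the lowercased argument list, per board
def pvChainM (L : List String) : Int :=
  if L.contains "-g" || L.contains "gold" then 1
  else if L.contains "-s" || L.contains "silver" then 2
  else if L.contains "-b" || L.contains "bronze" then 3
  else 0

def pvChainT (L : List String) : Int :=
  if L.contains "-p" || L.contains "platinum" || L.contains "plat" then 1
  else if L.contains "-g" || L.contains "gold" then 2
  else if L.contains "-s" || L.contains "silver" then 3
  else if L.contains "-b" || L.contains "bronze" then 4
  else if L.contains "-4" || L.contains "4th" then 5
  else if L.contains "-5" || L.contains "5th" then 6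
  else 0

theorem pvRankM_eq : pvRankM = PySem.Dict.mk [("-g", 1), ("gold", 1), ("-s", 2), ("silver", 2), ("-b", 3), ("bronze", 3)] := by rfl
theorem pvRankT_eq : pvRankT = PySem.Dict.mk [("-p", 1), ("platinum", 1), ("plat", 1), ("-g", 2), ("gold", 2), ("-s", 3), ("silver", 3), ("-b", 4), ("bronze", 4), ("-4", 5), ("4th", 5), ("-5", 6), ("5th", 6)] := by rfl

theorem get?_mk_nil (s : String) : (PySem.Dict.mk ([] : List (String × Int))).get? s = none := by rfl

theorem pvM_zero_right (b : Int) : pvM b 0 = b := by simp [pvM]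

theorem pvM_zero_left (c : Int) : pvM 0 c = c := by by_cases h : c = 0 <;> simp [pvM, h]

theorem pvM_nonneg {b c : Int} (hb : 0 ≤ b) (hc : 0 ≤ c) : 0 ≤ pvM b c := by
  simp only [pvM, beq_iff_eq, Bool.or_eq_true, decide_eq_true_eq]
  split_ifs <;> omega

theorem pvM_assoc {a b c : Int} (ha : 0 ≤ a) (hb : 0 ≤ b) (hc : 0 ≤ c) :
    pvM (pvM a b) c = pvM a (pvM b c) := by
  simp only [pvM, beq_iff_eq, Bool.or_eq_true, decide_eq_true_eq]
  split_ifs <;> omega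

theorem regroup2 (a b c d : Bool) : ((a || c) || (b || d)) = ((a || b) || (c || d)) := by
  cases a <;> cases b <;> cases c <;> cases d <;> rfl
theorem regroup3 (a b c d e f : Bool) :
    (((a || d) || (b || e)) || (c || f)) = ((a || b || c) || (d || e || f)) := by
  cases a <;> cases b <;> cases c <;> cases d <;> cases e <;> cases f <;> rfl

theorem rankOfM_eq (x : String) : pvRankOf pvRankM x =
    (if ("-g" == PySem.Str.lower x || "gold" == PySem.Str.lower x) then 1
     else if ("-s" == PySem.Str.lower x || "silver" == PySem.Str.lower x) then 2
     else if ("-b" == PySem.Str.lower x || "bronze" == PySem.Str.lower x) then 3 else 0) := by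
  simp only [pvRankOf, pvRankM_eq, PySem.Dict.get?_mk_cons, get?_mk_nil]
  generalize ("-g" == PySem.Str.lower x) = a1
  generalize ("gold" == PySem.Str.lower x) = a2
  generalize ("-s" == PySem.Str.lower x) = a3
  generalize ("silver" == PySem.Str.lower x) = a4
  generalize ("-b" == PySem.Str.lower x) = a5
  generalize ("bronze" == PySem.Str.lower x) = a6
  revert a1 a2 a3 a4 a5 a6
  decide

theorem rankOfT_eq (x : String) : pvRankOf pvRankT x =
    (if ("-p" == PySem.Str.lower x || "platinum" == PySem.Str.lower x || "plat" == PySem.Str.lower x) then 1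
     else if ("-g" == PySem.Str.lower x || "gold" == PySem.Str.lower x) then 2
     else if ("-s" == PySem.Str.lower x || "silver" == PySem.Str.lower x) then 3
     else if ("-b" == PySem.Str.lower x || "bronze" == PySem.Str.lower x) then 4
     else if ("-4" == PySem.Str.lower x || "4th" == PySem.Str.lower x) then 5
     else if ("-5" == PySem.Str.lower x || "5th" == PySem.Str.lower x) then 6 else 0) := by
  simp only [pvRankOf, pvRankT_eq, PySem.Dict.get?_mk_cons, get?_mk_nil]
  generalize ("-p" == PySem.Str.lower x) = a1
  generalize ("platinum" == PySem.Str.lower x) = a2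
  generalize ("plat" == PySem.Str.lower x) = a3
  generalize ("-g" == PySem.Str.lower x) = a4
  generalize ("gold" == PySem.Str.lower x) = a5
  generalize ("-s" == PySem.Str.lower x) = a6
  generalize ("silver" == PySem.Str.lower x) = a7
  generalize ("-b" == PySem.Str.lower x) = a8
  generalize ("bronze" == PySem.Str.lower x) = a9
  generalize ("-4" == PySem.Str.lower x) = a10
  generalize ("4th" == PySem.Str.lower x) = a11
  generalize ("-5" == PySem.Str.lower x) = a12
  generalize ("5th" == PySem.Str.lower x) = a13
  revert a1 a2 a3 a4 a5 a6 a7 a8 a9 a10 a11 a12 a13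
  decide

theorem rankOfM_nonneg (x : String) : 0 ≤ pvRankOf pvRankM x := by
  rw [rankOfM_eq]; split_ifs <;> omega
theorem rankOfT_nonneg (x : String) : 0 ≤ pvRankOf pvRankT x := by
  rw [rankOfT_eq]; split_ifs <;> omega

theorem pvMin_nonneg (rank : PySem.Dict String Int) (hr : ∀ x, 0 ≤ pvRankOf rank x)
    (args : List String) : 0 ≤ pvMin rank args := by
  induction args with
  | nil => simp [pvMin]
  | cons x xs ih => exact pvM_nonneg (hr x) ih

theorem pvStep_eq (rank : PySem.Dict String Int)
    (hpos : ∀ s v, PySem.Dict.get? rank s = some v → 0 < v) (b : Int) (x : String) :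
    pvStep rank b x = pvM b (pvRankOf rank x) := by
  unfold pvStep pvRankOf
  rcases h : PySem.Dict.get? rank (PySem.Str.lower x) with _ | v
  · simp [pvM]
  · have hv := hpos _ _ h
    simp only [Option.getD_some, pvM, beq_iff_eq, Bool.or_eq_true, decide_eq_true_eq]
    split_ifs <;> omega

-- an if-chain over (condition, value) pairs, used to reason about dict lookups
def pvIfChain (l : List (Bool × Int)) : Option Int :=
  l.foldr (fun p r => if p.1 then some p.2 else r) none

theorem chain_pos (l : List (Bool × Int)) (v : Int) (h : pvIfChain l = some v)
    (hv : ∀ p ∈ l, 0 < p.2) : 0 < v := by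
  induction l with
  | nil => simp [pvIfChain] at h
  | cons p ps ih =>
      unfold pvIfChain at h
      simp only [List.foldr_cons] at h
      by_cases hp : p.1 = true
      · rw [if_pos hp] at h
        cases h
        exact hv p (List.mem_cons_self ..)
      · rw [if_neg hp] at h
        exact ih h (fun q hq => hv q (List.mem_cons_of_mem _ hq))

theorem get?M_chain (s : String) : PySem.Dict.get? pvRankM s =
    pvIfChain [("-g" == s, 1), ("gold" == s, 1), ("-s" == s, 2), ("silver" == s, 2),
               ("-b" == s, 3), ("bronze" == s, 3)] := by
  rw [pvRankM_eq]
  simp only [PySem.Dict.get?_mk_cons, pvIfChain, List.foldr_cons, List.foldr_nil]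
  rfl

theorem get?T_chain (s : String) : PySem.Dict.get? pvRankT s =
    pvIfChain [("-p" == s, 1), ("platinum" == s, 1), ("plat" == s, 1), ("-g" == s, 2), ("gold" == s, 2),
               ("-s" == s, 3), ("silver" == s, 3), ("-b" == s, 4), ("bronze" == s, 4),
               ("-4" == s, 5), ("4th" == s, 5), ("-5" == s, 6), ("5th" == s, 6)] := by
  rw [pvRankT_eq]
  simp only [PySem.Dict.get?_mk_cons, pvIfChain, List.foldr_cons, List.foldr_nil]
  rfl

theorem pvRankM_pos : ∀ (s : String) (v : Int), PySem.Dict.get? pvRankM s = some v → 0 < v := by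
  intro s v h
  rw [get?M_chain] at h
  refine chain_pos _ v h ?_
  intro p hp
  simp only [List.mem_cons, List.not_mem_nil, or_false] at hp
  rcases hp with rfl|rfl|rfl|rfl|rfl|rfl <;> norm_num

theorem pvRankT_pos : ∀ (s : String) (v : Int), PySem.Dict.get? pvRankT s = some v → 0 < v := by
  intro s v h
  rw [get?T_chain] at h
  refine chain_pos _ v h ?_
  intro p hp
  simp only [List.mem_cons, List.not_mem_nil, or_false] at hp
  rcases hp with rfl|rfl|rfl|rfl|rfl|rfl|rfl|rfl|rfl|rfl|rfl|rfl|rfl <;> norm_num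

theorem pv_fold (rank : PySem.Dict String Int)
    (hpos : ∀ s v, PySem.Dict.get? rank s = some v → 0 < v)
    (hr : ∀ x, 0 ≤ pvRankOf rank x) :
    ∀ (args : List String) (b : Int), 0 ≤ b →
      args.foldl (pvStep rank) b = pvM b (pvMin rank args) := by
  intro args
  induction args with
  | nil => intro b _; exact (pvM_zero_right b).symm
  | cons x xs ih =>
      intro b hb
      rw [List.foldl_cons, pvStep_eq rank hpos b x, ih _ (pvM_nonneg hb (hr x)),
        pvM_assoc hb (hr x) (pvMin_nonneg rank hr xs)]
      rfl

theorem pvMinM_eq (args : List String) :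
    pvMin pvRankM args = pvChainM (args.map (fun x => PySem.Str.lower x)) := by
  induction args with
  | nil => simp [pvMin, pvChainM]
  | cons x xs ih =>
      show pvM (pvRankOf pvRankM x) (pvMin pvRankM xs) = _
      rw [ih, rankOfM_eq]
      simp only [pvChainM, List.map_cons, List.contains_cons]
      rw [regroup2 ("-g" == PySem.Str.lower x) ("gold" == PySem.Str.lower x) ((List.map (fun x => PySem.Str.lower x) xs).contains "-g") ((List.map (fun x => PySem.Str.lower x) xs).contains "gold"),
        regroup2 ("-s" == PySem.Str.lower x) ("silver" == PySem.Str.lower x) ((List.map (fun x => PySem.Str.lower x) xs).contains "-s") ((List.map (fun x => PySem.Str.lower x) xs).contains "silver"),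
        regroup2 ("-b" == PySem.Str.lower x) ("bronze" == PySem.Str.lower x) ((List.map (fun x => PySem.Str.lower x) xs).contains "-b") ((List.map (fun x => PySem.Str.lower x) xs).contains "bronze")]
      generalize ("-g" == PySem.Str.lower x || "gold" == PySem.Str.lower x) = g1
      generalize ("-s" == PySem.Str.lower x || "silver" == PySem.Str.lower x) = g2
      generalize ("-b" == PySem.Str.lower x || "bronze" == PySem.Str.lower x) = g3
      generalize ((List.map (fun x => PySem.Str.lower x) xs).contains "-g" || (List.map (fun x => PySem.Str.lower x) xs).contains "gold") = c1
      generalize ((List.map (fun x => PySem.Str.lower x) xs).contains "-s" || (List.map (fun x => PySem.Str.lower x) xs).contains "silver") = c2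
      generalize ((List.map (fun x => PySem.Str.lower x) xs).contains "-b" || (List.map (fun x => PySem.Str.lower x) xs).contains "bronze") = c3
      revert g1 g2 g3 c1 c2 c3
      decide

theorem pvMinT_eq (args : List String) :
    pvMin pvRankT args = pvChainT (args.map (fun x => PySem.Str.lower x)) := by
  induction args with
  | nil => simp [pvMin, pvChainT]
  | cons x xs ih =>
      show pvM (pvRankOf pvRankT x) (pvMin pvRankT xs) = _
      rw [ih, rankOfT_eq]
      simp only [pvChainT, List.map_cons, List.contains_cons]
      rw [regroup3 ("-p" == PySem.Str.lower x) ("platinum" == PySem.Str.lower x) ("plat" == PySem.Str.lower x) ((List.map (fun x => PySem.Str.lower x) xs).contains "-p") ((List.map (fun x => PySem.Str.lower x) xs).contains "platinum") ((List.map (fun x => PySem.Str.lower x) xs).contains "plat"),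
        regroup2 ("-g" == PySem.Str.lower x) ("gold" == PySem.Str.lower x) ((List.map (fun x => PySem.Str.lower x) xs).contains "-g") ((List.map (fun x => PySem.Str.lower x) xs).contains "gold"),
        regroup2 ("-s" == PySem.Str.lower x) ("silver" == PySem.Str.lower x) ((List.map (fun x => PySem.Str.lower x) xs).contains "-s") ((List.map (fun x => PySem.Str.lower x) xs).contains "silver"),
        regroup2 ("-b" == PySem.Str.lower x) ("bronze" == PySem.Str.lower x) ((List.map (fun x => PySem.Str.lower x) xs).contains "-b") ((List.map (fun x => PySem.Str.lower x) xs).contains "bronze"),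
        regroup2 ("-4" == PySem.Str.lower x) ("4th" == PySem.Str.lower x) ((List.map (fun x => PySem.Str.lower x) xs).contains "-4") ((List.map (fun x => PySem.Str.lower x) xs).contains "4th"),
        regroup2 ("-5" == PySem.Str.lower x) ("5th" == PySem.Str.lower x) ((List.map (fun x => PySem.Str.lower x) xs).contains "-5") ((List.map (fun x => PySem.Str.lower x) xs).contains "5th")]
      generalize ("-p" == PySem.Str.lower x || "platinum" == PySem.Str.lower x || "plat" == PySem.Str.lower x) = g1
      generalize ("-g" == PySem.Str.lower x || "gold" == PySem.Str.lower x) = g2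
      generalize ("-s" == PySem.Str.lower x || "silver" == PySem.Str.lower x) = g3
      generalize ("-b" == PySem.Str.lower x || "bronze" == PySem.Str.lower x) = g4
      generalize ("-4" == PySem.Str.lower x || "4th" == PySem.Str.lower x) = g5
      generalize ("-5" == PySem.Str.lower x || "5th" == PySem.Str.lower x) = g6
      generalize ((List.map (fun x => PySem.Str.lower x) xs).contains "-p" || (List.map (fun x => PySem.Str.lower x) xs).contains "platinum" || (List.map (fun x => PySem.Str.lower x) xs).contains "plat") = c1
      generalize ((List.map (fun x => PySem.Str.lower x) xs).contains "-g" || (List.map (fun x => PySem.Str.lower x) xs).contains "gold") = c2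
      generalize ((List.map (fun x => PySem.Str.lower x) xs).contains "-s" || (List.map (fun x => PySem.Str.lower x) xs).contains "silver") = c3
      generalize ((List.map (fun x => PySem.Str.lower x) xs).contains "-b" || (List.map (fun x => PySem.Str.lower x) xs).contains "bronze") = c4
      generalize ((List.map (fun x => PySem.Str.lower x) xs).contains "-4" || (List.map (fun x => PySem.Str.lower x) xs).contains "4th") = c5
      generalize ((List.map (fun x => PySem.Str.lower x) xs).contains "-5" || (List.map (fun x => PySem.Str.lower x) xs).contains "5th") = c6
      revert g1 g2 g3 g4 g5 g6 c1 c2 c3 c4 c5 c6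
      decide

-- ===== VERDICT =====
theorem get_sort_param_spec : Claim_equal_get_sort_param := by
  intro board_type args _
  unfold Spec_get_sort_param get_sort_param get_sort_param_alt
  show _ = pvFind _ args pvRank
  simp only [pvFind, pvRank]
  rw [pv_fold pvRankM pvRankM_pos rankOfM_nonneg args 0 le_rfl,
    pv_fold pvRankT pvRankT_pos rankOfT_nonneg args 0 le_rfl,
    pvM_zero_left, pvM_zero_left, pvMinM_eq, pvMinT_eq]
  simp only [pvChainM, pvChainT]
  split_ifs <;> rfl
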